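-- pv_equiv track=rewrite | github.com/hezral/suspended | src/app_manager.py | compare_running_apps
-- ===== SOURCE A (Python) =====
-- def compare_running_apps(dict_1, dict_2):
--     dict_1_keys = set(dict_1.keys())
--     d2_keys = set(dict_2.keys())
--     shared_keys = dict_1_keys.intersection(d2_keys)
--     added = dict_1_keys - d2_keys
--     removed = d2_keys - dict_1_keys
--     modified = {o : (dict_1[o], dict_2[o]) for o in shared_keys if dict_1[o] != dict_2[o]}
--     same = set(o for o in shared_keys if dict_1[o] == dict_2[o])
--     return added, removed, modified, same
-- ===== SOURCE B (Python) =====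
-- def compare_running_apps(dict_1, dict_2):
--     added = set()
--     modified = {}
--     same = set()
--     for k, v in dict_1.items():
--         if k not in dict_2:
--             added.add(k)
--         elif dict_2[k] != v:
--             modified[k] = (v, dict_2[k])
--         else:
--             same.add(k)
--     removed = {k for k in dict_2 if k not in dict_1}
--     return added, removed, modified, same
-- ===== Notes on version B (the rewrite author's own statement) =====
-- stated objective: alternative
-- what changed: Replaces the set-algebra pipeline (intersection/difference plus two comprehensions over the shared keys) by a single classifying pass over dict_1's items that sorts each key into added/modified/same as it goes, plus one short scan of dict_2 for removed.
import Mathlib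
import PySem

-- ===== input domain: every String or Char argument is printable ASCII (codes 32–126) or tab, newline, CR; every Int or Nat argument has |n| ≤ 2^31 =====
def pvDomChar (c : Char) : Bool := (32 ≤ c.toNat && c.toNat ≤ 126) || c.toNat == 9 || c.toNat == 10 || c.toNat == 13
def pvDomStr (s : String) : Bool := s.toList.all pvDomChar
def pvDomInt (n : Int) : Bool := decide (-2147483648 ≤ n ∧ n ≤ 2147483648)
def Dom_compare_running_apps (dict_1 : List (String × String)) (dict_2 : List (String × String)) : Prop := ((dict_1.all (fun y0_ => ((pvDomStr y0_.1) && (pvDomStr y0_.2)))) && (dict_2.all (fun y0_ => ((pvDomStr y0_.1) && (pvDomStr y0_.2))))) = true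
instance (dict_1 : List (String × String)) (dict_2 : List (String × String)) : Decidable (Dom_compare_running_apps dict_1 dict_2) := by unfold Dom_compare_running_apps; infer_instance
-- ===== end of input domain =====

-- B replaces A's set-algebra pipeline by a single classifying pass over dict_1's items
-- plus one scan of dict_2's keys; same results (sets/dict compared as in Python).

-- ===== PORT A =====
def compare_running_apps (dict_1 : List (String × String)) (dict_2 : List (String × String)) : List String × List String × (List (String × String × String)) × List String :=
  let d1 : PySem.Dict String String := PySem.Dict.ofList dict_1
  let d2 : PySem.Dict String String := PySem.Dict.ofList dict_2
  let dict_1_keys : PySem.Set String := PySem.Set.ofList d1.keys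
  let d2_keys : PySem.Set String := PySem.Set.ofList d2.keys
  let shared_keys : PySem.Set String := PySem.Set.inter dict_1_keys d2_keys
  let added : PySem.Set String := PySem.Set.diff dict_1_keys d2_keys
  let removed : PySem.Set String := PySem.Set.diff d2_keys dict_1_keys
  -- dict comprehension over shared_keys; dict_1[o]/dict_2[o] is exact as getD since o is a key of both
  let modified : List (String × String × String) :=
    (shared_keys.foldl (fun m o =>
        if d1.getD o "" ≠ d2.getD o "" then m.insert o (d1.getD o "", d2.getD o "") else m)
      PySem.Dict.empty).items
  let same : PySem.Set String :=
    PySem.Set.ofList (shared_keys.filter (fun o => d1.getD o "" == d2.getD o ""))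
  (added, removed, modified, same)

-- ===== PORT B =====
def compare_running_apps_alt (dict_1 : List (String × String)) (dict_2 : List (String × String)) : List String × List String × (List (String × String × String)) × List String :=
  let d1 : PySem.Dict String String := PySem.Dict.ofList dict_1
  let d2 : PySem.Dict String String := PySem.Dict.ofList dict_2
  let acc :=
    d1.items.foldl
      (fun (acc : PySem.Set String × PySem.Dict String (String × String) × PySem.Set String) kv =>
        if ¬ d2.contains kv.1 then (acc.1.add kv.1, acc.2.1, acc.2.2)
        else if d2.getD kv.1 "" ≠ kv.2 then (acc.1, acc.2.1.insert kv.1 (kv.2, d2.getD kv.1 ""), acc.2.2)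
        else (acc.1, acc.2.1, acc.2.2.add kv.1))
      (PySem.Set.empty, PySem.Dict.empty, PySem.Set.empty)
  let removed : PySem.Set String := PySem.Set.ofList (d2.keys.filter (fun k => ¬ d1.contains k))
  (acc.1, removed, acc.2.1.items, acc.2.2)

-- ===== PRECONDITION & SPEC =====
def Spec_compare_running_apps (dict_1 : List (String × String)) (dict_2 : List (String × String)) (out : List String × List String × (List (String × String × String)) × List String) : Prop := out = compare_running_apps_alt dict_1 dict_2
instance (dict_1 : List (String × String)) (dict_2 : List (String × String)) (out : List String × List String × (List (String × String × String)) × List String) : Decidable (Spec_compare_running_apps dict_1 dict_2 out) := by unfold Spec_compare_running_apps; infer_instance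

-- ===== CLAIM (what is proved, stated in full; the proofs are below) =====
def Claim_equal_compare_running_apps : Prop := ∀ (dict_1 : List (String × String)) (dict_2 : List (String × String)), Dom_compare_running_apps dict_1 dict_2 → Spec_compare_running_apps dict_1 dict_2 (compare_running_apps dict_1 dict_2)

-- ===== LEMMAS AND PROOFS =====

-- triple fold splits into three independent folds
theorem pv_fold3 {α β γ δ : Type} (fa : α → δ → α) (fm : β → δ → β) (fs : γ → δ → γ)
    (g : α × β × γ → δ → α × β × γ)
    (hg : ∀ a m s x, g (a, m, s) x = (fa a x, fm m x, fs s x)) :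
    ∀ (l : List δ) (a : α) (m : β) (s : γ),
      l.foldl g (a, m, s) = (l.foldl fa a, l.foldl fm m, l.foldl fs s) := by
  intro l
  induction l with
  | nil => intro a m s; rfl
  | cons x t ih => intro a m s; simp only [List.foldl_cons, hg]; exact ih _ _ _

-- conditional Set.add fold over fresh distinct keys appends the filtered keys
theorem pv_set_fold {δ : Type} (key : δ → String) (c : δ → Bool)
    (g : PySem.Set String → δ → PySem.Set String)
    (hg : ∀ s x, g s x = if c x then PySem.Set.add s (key x) else s) :
    ∀ (l : List δ) (a : List String), (a ++ l.map key).Nodup →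
      l.foldl g a = a ++ (l.filter c).map key := by
  intro l
  induction l with
  | nil => intro a _; simp
  | cons x t ih =>
      intro a h
      have hx : key x ∉ a := by
        intro hmem
        have := List.disjoint_of_nodup_append h
        exact this hmem (by simp)
      have hadd : PySem.Set.add a (key x) = a ++ [key x] := by
        simp [PySem.Set.add, PySem.Set.contains, hx]
      simp only [List.foldl_cons, hg]
      by_cases hc : c x
      · have := ih (a ++ [key x]) (by simpa using h)
        simp [hc, hadd, this]
      · have := ih a (by
          have : (a ++ (key x :: t.map key)).Nodup := by simpa using h
          exact (List.nodup_append.mp this).1.append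
            ((List.nodup_cons.mp (List.nodup_append.mp this).2.1).2)
            (by
              intro u hu hv
              exact (List.disjoint_of_nodup_append h) hu (by simp [hv]))
          )
        simp [hc, this]

-- conditional Dict.insert fold over fresh distinct keys appends the filtered pairs
theorem pv_dict_fold {δ ν : Type} (key : δ → String) (c : δ → Bool) (v : δ → ν)
    (g : PySem.Dict String ν → δ → PySem.Dict String ν)
    (hg : ∀ m x, g m x = if c x then m.insert (key x) (v x) else m) :
    ∀ (l : List δ) (m : PySem.Dict String ν),
      (∀ x ∈ l, m.contains (key x) = false) → (l.map key).Nodup →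
      (l.foldl g m).items = m.items ++ (l.filter c).map (fun x => (key x, v x)) := by
  intro l
  induction l with
  | nil => intro m _ _; simp
  | cons x t ih =>
      intro m hfresh hnd
      rw [List.map_cons] at hnd
      have hx1 : key x ∉ t.map key := (List.nodup_cons.mp hnd).1
      have hnd2 : (t.map key).Nodup := (List.nodup_cons.mp hnd).2
      simp only [List.foldl_cons, hg]
      by_cases hc : c x
      · have hfresh0 := hfresh x (List.mem_cons_self ..)
        have hfresh' : ∀ y ∈ t, (m.insert (key x) (v x)).contains (key y) = false := by
          intro y hy
          rw [PySem.Dict.contains_insert]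
          have h1 : key y ≠ key x := fun he => hx1 (he ▸ List.mem_map_of_mem hy)
          simp [h1, hfresh y (List.mem_cons_of_mem _ hy)]
        have hit : (m.insert (key x) (v x)).items = m.items ++ [(key x, v x)] := by
          rw [PySem.Dict.items_insert, hfresh0]; simp
        have := ih (m.insert (key x) (v x)) hfresh' hnd2
        simp [hc, this, hit]
      · have := ih m (fun y hy => hfresh y (List.mem_cons_of_mem _ hy)) hnd2
        simp [hc, this]

theorem pv_ofList_nodup {l : List String} (h : l.Nodup) : PySem.Set.ofList l = l := by
  have : ∀ (t a : List String), (a ++ t).Nodup → t.foldl PySem.Set.add a = a ++ t := by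
    intro t
    induction t with
    | nil => intro a _; simp
    | cons x r ih =>
        intro a ha
        have hx : x ∉ a := fun hmem => (List.disjoint_of_nodup_append ha) hmem (by simp)
        have hadd : PySem.Set.add a x = a ++ [x] := by
          simp [PySem.Set.add, PySem.Set.contains, hx]
        have := ih (a ++ [x]) (by simpa using ha)
        simp [List.foldl_cons, hadd, this]
  simpa using this l [] (by simpa using h)

-- Bool-level bridge: Dict.contains agrees with List.contains on the key list
theorem pv_contains_keys {ν : Type} (d : PySem.Dict String ν) (k : String) :
    d.keys.contains k = d.contains k := by
  by_cases h : k ∈ d.keys <;>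
    simp [PySem.Dict.contains_eq_decide_mem_keys, h]

theorem compare_running_apps_spec : Claim_equal_compare_running_apps := by
  intro dict_1 dict_2 _
  show compare_running_apps dict_1 dict_2 = compare_running_apps_alt dict_1 dict_2
  unfold compare_running_apps compare_running_apps_alt
  dsimp only
  set d1 : PySem.Dict String String := PySem.Dict.ofList dict_1 with hd1
  set d2 : PySem.Dict String String := PySem.Dict.ofList dict_2 with hd2
  have hK1 : d1.keys.Nodup := PySem.Dict.nodup_keys_ofList dict_1
  have hK2 : d2.keys.Nodup := PySem.Dict.nodup_keys_ofList dict_2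
  have hkeys : d1.keys = d1.items.map Prod.fst := rfl
  have hgd : ∀ kv ∈ d1.items, d1.getD kv.1 "" = kv.2 := by
    intro kv hkv
    have hkv2 : (kv.1, kv.2) ∈ d1.items := by simpa using hkv
    exact PySem.Dict.getD_of_mem_items d1 hkv2 hK1 ""
  -- split B's triple fold
  rw [pv_fold3
      (fun a kv => if ¬ d2.contains kv.1 then PySem.Set.add a kv.1 else a)
      (fun m (kv : String × String) => if ¬ d2.contains kv.1 then m
        else if d2.getD kv.1 "" ≠ kv.2 then m.insert kv.1 (kv.2, d2.getD kv.1 "") else m)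
      (fun s kv => if ¬ d2.contains kv.1 then s else if d2.getD kv.1 "" ≠ kv.2 then s
        else PySem.Set.add s kv.1)
      _
      (by
        intro a m s x
        by_cases h1 : d2.contains x.1 = true
        · by_cases h2 : d2.getD x.1 "" = x.2 <;> simp [h1, h2]
        · simp [h1])]
  dsimp only
  rw [pv_ofList_nodup hK1, pv_ofList_nodup hK2]
  -- B's added fold
  rw [pv_set_fold Prod.fst (fun kv => !d2.contains kv.1) _
      (by intro s x; by_cases h1 : d2.contains x.1 = true <;> simp [h1])
      d1.items PySem.Set.empty (by simpa using hK1)]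
  -- B's same fold
  rw [pv_set_fold Prod.fst (fun kv => d2.contains kv.1 && (d2.getD kv.1 "" == kv.2)) _
      (by
        intro s x
        by_cases h1 : d2.contains x.1 = true
        · by_cases h2 : d2.getD x.1 "" = x.2 <;> simp [h1, h2]
        · simp [h1])
      d1.items PySem.Set.empty (by simpa using hK1)]
  -- B's modified fold
  rw [pv_dict_fold Prod.fst (fun kv => d2.contains kv.1 && !(d2.getD kv.1 "" == kv.2))
      (fun kv => (kv.2, d2.getD kv.1 "")) _
      (by
        intro m x
        by_cases h1 : d2.contains x.1 = true
        · by_cases h2 : d2.getD x.1 "" = x.2 <;> simp [h1, h2]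
        · simp [h1])
      d1.items PySem.Dict.empty (by intro x _; simp) (by simpa using hK1)]
  -- A's modified fold (over the shared keys, which are Nodup and fresh for the empty dict)
  rw [pv_dict_fold (fun o => o) (fun o => !(d1.getD o "" == d2.getD o ""))
      (fun o => (d1.getD o "", d2.getD o "")) _
      (by
        intro m o
        by_cases h2 : d1.getD o "" = d2.getD o "" <;> simp [h2])
      (PySem.Set.inter d1.keys d2.keys) PySem.Dict.empty (by intro x _; simp)
      (by simpa [PySem.Set.inter] using hK1.filter _)]
  -- now everything is filters and maps over d1.items / keys; compare componentwise
  refine Prod.ext ?_ (Prod.ext ?_ (Prod.ext ?_ ?_))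
  · -- added
    show PySem.Set.diff d1.keys d2.keys = _
    simp only [PySem.Set.diff, PySem.Set.contains, hkeys, List.filter_map]
    apply congrArg
    apply List.filter_congr
    intro kv _
    simp [Function.comp, PySem.Dict.contains_eq_decide_mem_keys]
  · -- removed
    show PySem.Set.diff d2.keys d1.keys = _
    rw [pv_ofList_nodup (hK2.filter _)]
    simp only [PySem.Set.diff, PySem.Set.contains]
    apply List.filter_congr
    intro k _
    simp [PySem.Dict.contains_eq_decide_mem_keys]
  · -- modified
    show List.nil ++ _ = List.nil ++ _
    simp only [List.nil_append]
    rw [show (PySem.Set.inter d1.keys d2.keys) = d1.keys.filter (fun x => d2.keys.contains x) from rfl]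
    rw [hkeys, List.filter_map, List.filter_map, List.map_map]
    have hfe : (d1.items.filter ((fun x => d2.keys.contains x) ∘ Prod.fst)).filter
          ((fun o => !(d1.getD o "" == d2.getD o "")) ∘ Prod.fst)
        = d1.items.filter (fun kv => d2.contains kv.1 && !(d2.getD kv.1 "" == kv.2)) := by
      rw [List.filter_filter]
      apply List.filter_congr
      intro kv hkv
      simp only [Function.comp, pv_contains_keys, hgd kv hkv]
      by_cases h2 : d2.getD kv.1 "" = kv.2
      · simp [h2]
      · have e1 : (kv.2 == d2.getD kv.1 "") = false := by simpa using fun he => h2 he.symm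
        have e2 : (d2.getD kv.1 "" == kv.2) = false := by simpa using h2
        rw [e1, e2]; simp [Bool.and_comm]
    rw [hfe]
    apply List.map_congr_left
    intro kv hkv
    have hkv' : kv ∈ d1.items := (List.mem_filter.mp hkv).1
    simp [Function.comp, hgd kv hkv']
  · -- same
    dsimp only
    rw [pv_ofList_nodup (((by simpa [PySem.Set.inter] using hK1.filter _ : ((PySem.Set.inter d1.keys d2.keys)).Nodup)).filter _)]
    rw [show (PySem.Set.inter d1.keys d2.keys) = d1.keys.filter (fun x => d2.keys.contains x) from rfl]
    rw [hkeys, List.filter_map, List.filter_map, List.filter_filter]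
    simp only [show (PySem.Set.empty : List String) = [] from rfl, List.nil_append]
    apply congrArg
    apply List.filter_congr
    intro kv hkv
    simp only [Function.comp, pv_contains_keys, hgd kv hkv]
    by_cases h2 : d2.getD kv.1 "" = kv.2
    · simp [h2]
    · have e1 : (kv.2 == d2.getD kv.1 "") = false := by simpa using fun he => h2 he.symm
      have e2 : (d2.getD kv.1 "" == kv.2) = false := by simpa using h2
      rw [e1, e2]; simp [Bool.and_comm]
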